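-- pv_equiv track=rewrite | github.com/doobMM/hibari_tda | tda_pipeline/experiments/run_module_generation_unified.py | replicate_inst1
-- ===== SOURCE A (Python) =====
-- MODULE_LEN = 32
--
-- N_INST1_COPIES = 33
--
-- def replicate_inst1(mod):
--     out = []
--     for m in range(N_INST1_COPIES):
--         off = m * MODULE_LEN
--         for s, p, e in mod:
--             ns = s + off
--             ne = min(e + off, off + MODULE_LEN)
--             if ns < off + MODULE_LEN and ne > ns:
--                 out.append((ns, p, ne))
--     return out
-- ===== SOURCE B (Python) =====
-- MODULE_LEN = 32
--
-- N_INST1_COPIES = 33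
--
-- def _shift(block, off):
--     return [(s + off, p, e + off) for s, p, e in block]
--
-- def _rep(block, n):
--     # copies 0..n-1 of block, copy i shifted by i*MODULE_LEN, built by doubling
--     if n == 0:
--         return []
--     if n == 1:
--         return list(block)
--     h = n // 2
--     half = _rep(block, h)
--     out = half + _shift(half, h * MODULE_LEN)
--     if n % 2 == 1:
--         out += _shift(block, (n - 1) * MODULE_LEN)
--     return out
--
-- def replicate_inst1(mod):
--     block = [(s, p, min(e, MODULE_LEN)) for s, p, e in mod
--              if s < MODULE_LEN and min(e, MODULE_LEN) > s]
--     return _rep(block, N_INST1_COPIES)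
-- ===== Notes on version B (the rewrite author's own statement) =====
-- stated objective: alternative
-- what changed: B clips/filters the intervals once into a base block and then builds the 33 shifted copies by recursive doubling (half + shifted half, plus one shifted block when odd) instead of A's nested loop that re-tests and re-clamps every interval in every copy.
import Mathlib
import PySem

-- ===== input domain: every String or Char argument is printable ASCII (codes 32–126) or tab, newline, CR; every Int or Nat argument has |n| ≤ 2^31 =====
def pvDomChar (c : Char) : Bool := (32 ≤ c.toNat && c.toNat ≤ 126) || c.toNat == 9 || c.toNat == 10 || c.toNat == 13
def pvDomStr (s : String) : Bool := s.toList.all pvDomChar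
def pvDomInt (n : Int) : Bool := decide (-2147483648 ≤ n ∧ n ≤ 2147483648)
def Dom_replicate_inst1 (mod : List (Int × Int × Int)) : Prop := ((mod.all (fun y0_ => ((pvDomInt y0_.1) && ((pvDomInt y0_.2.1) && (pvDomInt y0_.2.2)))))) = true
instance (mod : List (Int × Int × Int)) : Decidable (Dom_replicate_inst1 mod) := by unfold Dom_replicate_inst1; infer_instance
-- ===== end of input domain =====

-- B clips/filters the intervals once into a base block and builds the 33 shifted copies by recursive doubling instead of A's nested re-clamping loop (alternative algorithm; return value proved equal).


-- ===== PORT A =====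
def replicate_inst1 (mod : List (Int × Int × Int)) : List (Int × Int × Int) :=
  (PySem.List.pyRange 0 33 1).foldl (fun out m =>
    let off := m * 32
    mod.foldl (fun out t =>
      let ns := t.1 + off
      let ne := min (t.2.2 + off) (off + 32)
      if ns < off + 32 ∧ ne > ns then out ++ [(ns, t.2.1, ne)] else out) out) []

-- ===== PORT B =====
def pvShift (block : List (Int × Int × Int)) (off : Int) : List (Int × Int × Int) :=
  block.map (fun t => (t.1 + off, t.2.1, t.2.2 + off))

def pvRep (block : List (Int × Int × Int)) : Nat → List (Int × Int × Int)
  | 0 => []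
  | 1 => block
  | (n+2) =>
    let h := (n+2) / 2
    let half := pvRep block h
    let out := half ++ pvShift half ((h : Int) * 32)
    if (n+2) % 2 = 1 then out ++ pvShift block ((((n : Int)+2) - 1) * 32) else out
decreasing_by
  omega

def replicate_inst1_alt (mod : List (Int × Int × Int)) : List (Int × Int × Int) :=
  let block := (mod.filter (fun t => decide (t.1 < 32 ∧ min t.2.2 32 > t.1))).map
    (fun t => (t.1, t.2.1, min t.2.2 32))
  pvRep block 33

-- ===== PRECONDITION & SPEC =====
def Spec_replicate_inst1 (mod : List (Int × Int × Int)) (out : List (Int × Int × Int)) : Prop := out = replicate_inst1_alt mod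
instance (mod : List (Int × Int × Int)) (out : List (Int × Int × Int)) : Decidable (Spec_replicate_inst1 mod out) := by unfold Spec_replicate_inst1; infer_instance

-- ===== CLAIM (what is proved, stated in full; the proofs are below) =====
def Claim_equal_replicate_inst1 : Prop := ∀ (mod : List (Int × Int × Int)), Dom_replicate_inst1 mod → Spec_replicate_inst1 mod (replicate_inst1 mod)

-- ===== LEMMAS AND PROOFS =====

-- the clipped/filtered base block
def pvBase (mod : List (Int × Int × Int)) : List (Int × Int × Int) :=
  (mod.filter (fun t => decide (t.1 < 32 ∧ min t.2.2 32 > t.1))).map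
    (fun t => (t.1, t.2.1, min t.2.2 32))

-- canonical form: copies 0..n-1 of the block, copy i shifted by i*32
def pvJ (block : List (Int × Int × Int)) (n : Nat) : List (Int × Int × Int) :=
  ((List.range n).map (fun (i : Nat) => pvShift block ((i : Int) * 32))).flatten

theorem pvShift_shift (b : List (Int × Int × Int)) (a c : Int) :
    pvShift (pvShift b a) c = pvShift b (a + c) := by
  simp only [pvShift, List.map_map]
  congr 1; funext t; simp [add_assoc]

theorem pvShift_J (block : List (Int × Int × Int)) (n : Nat) (c : Int) :
    pvShift (pvJ block n) c
      = ((List.range n).map (fun (i : Nat) => pvShift block ((i : Int) * 32 + c))).flatten := by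
  simp only [pvJ, pvShift, List.map_flatten, List.map_map]
  congr 1; congr 1; funext i
  have := pvShift_shift block ((i : Int) * 32) c
  simpa [pvShift, Function.comp] using this

theorem pvJ_split (block : List (Int × Int × Int)) (a b : Nat) :
    pvJ block (a + b)
      = pvJ block a ++ ((List.range b).map (fun (i : Nat) => pvShift block ((i : Int) * 32 + (a : Int) * 32))).flatten := by
  simp only [pvJ, List.range_add, List.map_append, List.flatten_append, List.map_map]
  congr 1
  congr 1
  apply List.map_congr_left
  intro i _
  simp only [Function.comp]
  congr 1
  push_cast
  ring

theorem pvRep_eq_J (block : List (Int × Int × Int)) :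
    ∀ n, pvRep block n = pvJ block n := by
  intro n
  induction n using Nat.strong_induction_on with
  | _ n ih =>
    match n with
    | 0 => rw [pvRep.eq_def]; simp [pvJ]
    | 1 => rw [pvRep.eq_def]; simp [pvJ, pvShift]
    | (k+2) =>
      have hh : (k+2)/2 < k+2 := by omega
      rw [pvRep.eq_def]
      simp only [ih _ hh]
      by_cases hodd : (k+2) % 2 = 1
      · have hk : k + 2 = (k+2)/2 + ((k+2)/2 + 1) := by omega
        rw [if_pos hodd, pvShift_J]
        conv_rhs => rw [hk, pvJ_split]
        rw [show (List.range ((k+2)/2 + 1)) = List.range ((k+2)/2) ++ [(k+2)/2] from by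
          simp [List.range_succ]]
        simp only [List.map_append, List.flatten_append, List.map_cons, List.map_nil,
          List.flatten_cons, List.flatten_nil, List.append_nil, ← List.append_assoc]
        congr 2
        push_cast
        omega
      · have hk : k + 2 = (k+2)/2 + (k+2)/2 := by omega
        rw [if_neg hodd, pvShift_J]
        conv_rhs => rw [hk, pvJ_split]

-- A's inner loop appends the shifted base block
theorem pv_inner (off : Int) (mod : List (Int × Int × Int)) :
    ∀ acc : List (Int × Int × Int),
      mod.foldl (fun out t =>
        let ns := t.1 + off
        let ne := min (t.2.2 + off) (off + 32)
        if ns < off + 32 ∧ ne > ns then out ++ [(ns, t.2.1, ne)] else out) acc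
      = acc ++ pvShift (pvBase mod) off := by
  induction mod with
  | nil => intro acc; simp [pvBase, pvShift]
  | cons t rest ih =>
    intro acc
    rw [List.foldl_cons, ih]
    by_cases h : t.1 < 32 ∧ min t.2.2 32 > t.1
    · have hc : t.1 + off < off + 32 ∧ min (t.2.2 + off) (off + 32) > t.1 + off := by omega
      have hm : min (t.2.2 + off) (off + 32) = min t.2.2 32 + off := by omega
      have hd : decide (t.1 < 32 ∧ min t.2.2 32 > t.1) = true := decide_eq_true h
      show (if t.1 + off < off + 32 ∧ min (t.2.2 + off) (off + 32) > t.1 + off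
              then acc ++ [(t.1 + off, t.2.1, min (t.2.2 + off) (off + 32))] else acc)
            ++ pvShift (pvBase rest) off
          = acc ++ pvShift (pvBase (t :: rest)) off
      rw [if_pos hc]
      simp only [pvBase, pvShift, List.filter_cons, hd, if_true, List.map_cons]
      simp [hm, List.append_assoc]
    · have hc : ¬ (t.1 + off < off + 32 ∧ min (t.2.2 + off) (off + 32) > t.1 + off) := by omega
      have hd : decide (t.1 < 32 ∧ min t.2.2 32 > t.1) = false := decide_eq_false h
      show (if t.1 + off < off + 32 ∧ min (t.2.2 + off) (off + 32) > t.1 + off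
              then acc ++ [(t.1 + off, t.2.1, min (t.2.2 + off) (off + 32))] else acc)
            ++ pvShift (pvBase rest) off
          = acc ++ pvShift (pvBase (t :: rest)) off
      rw [if_neg hc]
      simp only [pvBase, pvShift, List.filter_cons, hd]
      simp

theorem pv_foldA (mod : List (Int × Int × Int)) (l : List Int) :
    ∀ acc : List (Int × Int × Int),
      l.foldl (fun out m =>
        let off := m * 32
        mod.foldl (fun out t =>
          let ns := t.1 + off
          let ne := min (t.2.2 + off) (off + 32)
          if ns < off + 32 ∧ ne > ns then out ++ [(ns, t.2.1, ne)] else out) out) acc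
      = acc ++ (l.map (fun m => pvShift (pvBase mod) (m * 32))).flatten := by
  induction l with
  | nil => intro acc; simp
  | cons m rest ih =>
    intro acc
    rw [List.foldl_cons, pv_inner, ih]
    simp [List.append_assoc]

theorem pyRange33 : PySem.List.pyRange 0 33 1 = (List.range 33).map (fun (i : Nat) => (i : Int)) := by
  decide

theorem replicate_inst1_eq_J (mod : List (Int × Int × Int)) :
    replicate_inst1 mod = pvJ (pvBase mod) 33 := by
  unfold replicate_inst1
  rw [pv_foldA, pyRange33]
  simp [pvJ, List.map_map, Function.comp_def]

-- ===== VERDICT (by name: the statement is the Claim_ definition above) =====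
theorem replicate_inst1_spec : Claim_equal_replicate_inst1 := by
  intro mod _
  unfold Spec_replicate_inst1 replicate_inst1_alt
  show replicate_inst1 mod = pvRep (pvBase mod) 33
  rw [replicate_inst1_eq_J, pvRep_eq_J]
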